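-- pv_equiv track=rewrite | github.com/cortega26/PDF-Text-Analizer | pdf_processor.py | _generate_snippet
-- ===== SOURCE A (Python) =====
-- from typing import Dict, Optional, Set, List, Any, TypeVar, Generic, Union
--
-- def _generate_snippet(content: str, query_words: Set[str],
--                      context_words: int = 10) -> str:
--     """Generate a relevant text snippet containing query words."""
--     words = content.split()
--     best_snippet = ""
--     max_matches = 0
--
--     # Slide a window over the text to find the best matching context
--     for i in range(len(words)):
--         window = words[i:i + context_words * 2]
--         if not window:
--             break
--
--         # Count query word matches in this window
--         matches = sum(1 for word in window
--                      if word.lower() in query_words)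
--
--         # Update best snippet if this window has more matches
--         if matches > max_matches:
--             max_matches = matches
--             best_snippet = ' '.join(window)
--
--     # Add ellipsis if we have a snippet
--     return f"{best_snippet}..." if best_snippet else ""
-- ===== SOURCE B (Python) =====
-- def _generate_snippet(content, query_words, context_words=10):
--     """Generate a relevant text snippet containing query words."""
--     words = content.split()
--     k = context_words * 2
--     if not words or k <= 0:
--         return ""
--     n = len(words)
--     flags = [1 if w.lower() in query_words else 0 for w in words]
--     # sliding-window running count instead of rescanning each window
--     cnt = sum(flags[:k])
--     best_i = -1
--     best = 0
--     for i in range(n):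
--         if cnt > best:
--             best = cnt
--             best_i = i
--         cnt -= flags[i]
--         if i + k < n:
--             cnt += flags[i + k]
--     if best_i < 0:
--         return ""
--     return " ".join(words[best_i:best_i + k]) + "..."
-- ===== Notes on version B (the rewrite author's own statement) =====
-- stated objective: alternative
-- what changed: B precomputes per-word match flags once and maintains the window match count incrementally while sliding (tracking only the best start index), instead of re-slicing and re-scanning a full window of size 2*context_words at every position.
-- outside the precondition, e.g. on _generate_snippet('a b c', {'a'}, -1): A returns 'a...', B returns ''
import Mathlib
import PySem

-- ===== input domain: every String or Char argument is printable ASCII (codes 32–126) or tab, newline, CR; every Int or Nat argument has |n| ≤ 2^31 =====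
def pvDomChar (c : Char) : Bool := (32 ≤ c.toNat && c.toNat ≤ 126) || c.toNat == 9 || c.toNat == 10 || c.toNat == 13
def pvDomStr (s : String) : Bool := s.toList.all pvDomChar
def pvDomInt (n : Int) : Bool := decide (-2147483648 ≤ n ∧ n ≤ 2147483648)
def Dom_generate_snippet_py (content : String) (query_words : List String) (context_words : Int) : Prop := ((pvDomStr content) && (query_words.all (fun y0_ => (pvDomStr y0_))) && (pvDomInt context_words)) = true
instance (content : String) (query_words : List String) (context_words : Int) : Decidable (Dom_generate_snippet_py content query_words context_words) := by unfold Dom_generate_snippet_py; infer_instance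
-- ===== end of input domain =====

-- B replaces A's per-position window re-scan by one precomputed flag list and an incrementally
-- maintained sliding match count, tracking only the best start index (a different algorithm;
-- not measured faster on the generated inputs).

-- ===== PORT A =====
-- the 'for i in range(len(words))' loop with early 'break' on an empty window
def pvAGo (words query_words : List String) (k : Int) (i : Nat) (best_snippet : String)
    (max_matches : Int) : String :=
  if _h : i < words.length then
    let window := PySem.List.slice words (some (i : Int)) (some ((i : Int) + k))
    if window = [] then best_snippet
    else
      let matchCount := window.foldl
        (fun acc word => if PySem.Set.contains query_words (PySem.Str.lower word) then acc + 1 else acc) (0 : Int)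
      if matchCount > max_matches then
        pvAGo words query_words k (i + 1) (PySem.Str.join " " window) matchCount
      else
        pvAGo words query_words k (i + 1) best_snippet max_matches
  else best_snippet
termination_by words.length - i

def generate_snippet_py (content : String) (query_words : List String) (context_words : Int) : String :=
  let words := PySem.Str.split₀ content
  let best_snippet := pvAGo words query_words (context_words * 2) 0 "" 0
  if best_snippet ≠ "" then best_snippet ++ "..." else ""

-- ===== PORT B =====
-- B's single sliding-window loop: running count cnt, best count and best start index
def pvBGo (flags : List Int) (k : Int) (i : Nat) (cnt : Int) (best_i best : Int) : Int × Int :=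
  if _h : i < flags.length then
    let p := if cnt > best then ((i : Int), cnt) else (best_i, best)
    let cnt' := cnt - PySem.List.pyGetD flags (i : Int) 0 +
      (if (i : Int) + k < (flags.length : Int) then PySem.List.pyGetD flags ((i : Int) + k) 0 else 0)
    pvBGo flags k (i + 1) cnt' p.1 p.2
  else (best_i, best)
termination_by flags.length - i

def generate_snippet_py_alt (content : String) (query_words : List String) (context_words : Int) : String :=
  let words := PySem.Str.split₀ content
  let k := context_words * 2
  if words = [] ∨ k ≤ 0 then ""
  else
    let flags := words.map
      (fun w => if PySem.Set.contains query_words (PySem.Str.lower w) then (1 : Int) else 0)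
    let cnt := (PySem.List.slice flags none (some k)).sum
    let r := pvBGo flags k 0 cnt (-1) 0
    if r.1 < 0 then ""
    else PySem.Str.join " " (PySem.List.slice words (some r.1) (some (r.1 + k))) ++ "..."

-- ===== PRECONDITION & SPEC =====
-- whether a word counts as a query match
def pvFlag (query_words : List String) (w : String) : Bool :=
  PySem.Set.contains query_words (PySem.Str.lower w)

-- Pre_ excludes inputs with nonpositive context_words on which some word matches the query (A still
-- returns there): A's window words[i:i+2*context_words] then hits Python's negative-slice-bound rule and
-- yields an accidental end-anchored snippet; B naturally yields no snippet for a nonpositive window size.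
def Pre_generate_snippet_py (content : String) (query_words : List String) (context_words : Int) : Prop :=
  0 < context_words ∨ (PySem.Str.split₀ content).all (fun w => !(pvFlag query_words w)) = true
instance (content : String) (query_words : List String) (context_words : Int) : Decidable (Pre_generate_snippet_py content query_words context_words) := by unfold Pre_generate_snippet_py; infer_instance

def pvWitness_generate_snippet_py : String × List String × Int := ("hello brave world", ["world"], 1)

def Spec_generate_snippet_py (content : String) (query_words : List String) (context_words : Int) (out : String) : Prop := out = generate_snippet_py_alt content query_words context_words
instance (content : String) (query_words : List String) (context_words : Int) (out : String) : Decidable (Spec_generate_snippet_py content query_words context_words out) := by unfold Spec_generate_snippet_py; infer_instance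

-- ===== CLAIM (what is proved, stated in full; the proofs are below) =====
def Claim_equal_generate_snippet_py : Prop := ∀ (content : String) (query_words : List String) (context_words : Int), Dom_generate_snippet_py content query_words context_words → Pre_generate_snippet_py content query_words context_words → Spec_generate_snippet_py content query_words context_words (generate_snippet_py content query_words context_words)

-- ===== LEMMAS AND PROOFS =====

-- words produced by str.split() are nonempty
theorem pv_split₀_go_ne (s : List Char) : ∀ (cur : List Char) (acc : List (List Char)),
    (∀ w ∈ acc, w ≠ []) → ∀ w ∈ PySem.Chars.split₀.go s cur acc, w ≠ [] := by
  induction s with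
  | nil =>
      intro cur acc hacc w hw
      simp only [PySem.Chars.split₀.go] at hw
      by_cases hc : cur.isEmpty
      · simp [hc] at hw; exact hacc w hw
      · simp [hc] at hw
        rcases hw with hw | hw
        · exact hacc w hw
        · subst hw; simpa [List.isEmpty_iff] using hc
  | cons c rest ih =>
      intro cur acc hacc w hw
      simp only [PySem.Chars.split₀.go] at hw
      by_cases hs : PySem.Chars.isspace c
      · by_cases hc : cur.isEmpty
        · simp [hs, hc] at hw; exact ih [] acc hacc w hw
        · simp [hs, hc] at hw
          refine ih [] (cur.reverse :: acc) ?_ w hw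
          intro v hv
          rcases List.mem_cons.mp hv with hv | hv
          · subst hv; simp [List.isEmpty_iff] at hc; simp [hc]
          · exact hacc v hv
      · simp [hs] at hw; exact ih (c :: cur) acc hacc w hw

theorem pv_words_ne (content : String) : ∀ w ∈ PySem.Str.split₀ content, w ≠ "" := by
  intro w hw
  simp only [PySem.Str.split₀, List.mem_map] at hw
  obtain ⟨l, hl, rfl⟩ := hw
  have : l ≠ [] := pv_split₀_go_ne _ [] [] (by simp) l hl
  simpa using this

theorem pv_join_ne (parts : List String) (hne : parts ≠ []) (hw : ∀ w ∈ parts, w ≠ "") :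
    PySem.Str.join " " parts ≠ "" := by
  intro h
  have h' : (PySem.Str.join " " parts).toList = [] := by simp [h]
  rw [PySem.Str.toList_join] at h'
  match parts, hne with
  | [p], _ =>
      rw [show (List.map String.toList [p]) = [p.toList] from rfl, PySem.Chars.join_singleton] at h'
      exact hw p (by simp) (by simpa using h')
  | p :: q :: rest, _ =>
      rw [show (List.map String.toList (p :: q :: rest)) = p.toList :: q.toList :: List.map String.toList rest from rfl,
        PySem.Chars.join_cons_cons] at h'
      simp at h'

-- the match count of the window starting at i
def pvC (words query_words : List String) (k' : Nat) (i : Nat) : Int :=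
  (((words.drop i).take k').countP (pvFlag query_words) : Int)

-- sliding step: how the window count changes from position i to i+1
theorem pv_step (words query_words : List String) (k' : Nat) (hk : 1 ≤ k') (i : Nat)
    (hi : i < words.length) :
    pvC words query_words k' (i + 1) =
      pvC words query_words k' i
        - (if pvFlag query_words words[i] then (1 : Int) else 0)
        + (if h : i + k' < words.length then
            (if pvFlag query_words words[i + k'] then (1 : Int) else 0) else 0) := by
  unfold pvC
  rw [List.drop_eq_getElem_cons hi]
  obtain ⟨k'', rfl⟩ : ∃ k'', k' = k'' + 1 := ⟨k' - 1, by omega⟩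
  rw [List.take_succ_cons, List.countP_cons]
  by_cases hlt : i + (k'' + 1) < words.length
  · have hlen : k'' < (words.drop (i + 1)).length := by
      rw [List.length_drop]; omega
    rw [show k'' + 1 = k'' + 1 from rfl, List.take_add_one, List.getElem?_eq_getElem hlen,
      List.countP_append]
    have : (words.drop (i + 1))[k''] = words[i + 1 + k''] := List.getElem_drop ..
    rw [this]
    have hji : i + 1 + k'' = i + (k'' + 1) := by omega
    simp only [hji, hlt, dif_pos]
    by_cases h1 : pvFlag query_words words[i]
    · by_cases h2 : pvFlag query_words words[i + (k'' + 1)] <;>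
        simp [h1, h2] <;> push_cast <;> ring
    · by_cases h2 : pvFlag query_words words[i + (k'' + 1)] <;>
        simp [h1, h2] <;> push_cast <;> ring
  · have hlen : (words.drop (i + 1)).length ≤ k'' := by
      rw [List.length_drop]; omega
    rw [List.take_of_length_le hlen, List.take_of_length_le (le_trans hlen (by omega))]
    simp only [hlt, dif_neg, not_false_iff]
    by_cases h1 : pvFlag query_words words[i] <;> simp [h1]

-- relation carried through the loops: B's best index determines A's best snippet
def pvRel (words query_words : List String) (k' : Nat) (bi : Int) (bs : String) : Prop :=
  (bi = -1 ∧ bs = "") ∨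
    (∃ j : Nat, bi = (j : Int) ∧ j < words.length ∧
      bs = PySem.Str.join " " ((words.drop j).take k'))

theorem pv_flags_getD (words query_words : List String) (i : Nat) (hi : i < words.length) :
    (words.map (fun w => if PySem.Set.contains query_words (PySem.Str.lower w) then (1 : Int) else 0)).getD i 0
      = (if pvFlag query_words words[i] then (1 : Int) else 0) := by
  rw [List.getD_eq_getElem?_getD, List.getElem?_eq_getElem (by simpa using hi)]
  simp [pvFlag]

-- main loop invariant: A's loop and B's loop stay related
theorem pv_loop (words query_words : List String) (k' : Nat) (hk : 1 ≤ k') :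
    ∀ (m i : Nat), words.length - i = m → ∀ (bi maxm : Int) (bs : String),
      pvRel words query_words k' bi bs →
      pvRel words query_words k'
        (pvBGo (words.map (fun w => if PySem.Set.contains query_words (PySem.Str.lower w) then (1 : Int) else 0))
          (k' : Int) i (pvC words query_words k' i) bi maxm).1
        (pvAGo words query_words (k' : Int) i bs maxm) := by
  intro m
  induction m with
  | zero =>
      intro i him bi maxm bs hrel
      have hige : ¬ i < words.length := by omega
      rw [pvAGo, pvBGo]
      simp only [List.length_map, dif_neg hige]
      exact hrel
  | succ m ih =>
      intro i him bi maxm bs hrel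
      have hi : i < words.length := by omega
      rw [pvAGo, pvBGo]
      simp only [List.length_map, dif_pos hi]
      -- the window is nonempty
      have hwin : PySem.List.slice words (some (i : Int)) (some ((i : Int) + (k' : Int))) =
          (words.drop i).take k' := PySem.List.slice_natCast_add words i k'
      have hwne : (words.drop i).take k' ≠ [] := by
        intro h
        rcases List.take_eq_nil_iff.mp h with h | h
        · omega
        · rw [List.drop_eq_nil_iff] at h; omega
      rw [hwin]
      rw [if_neg hwne]
      -- A's matches is the window count
      have hmatch : ((words.drop i).take k').foldl
          (fun acc word => if PySem.Set.contains query_words (PySem.Str.lower word) then acc + 1 else acc) (0 : Int)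
          = pvC words query_words k' i := by
        rw [PySem.List.foldl_if_add_one]; unfold pvC pvFlag; ring
      -- B's next count is the next window count
      have hcnt' : pvC words query_words k' i -
            PySem.List.pyGetD (words.map (fun w => if PySem.Set.contains query_words (PySem.Str.lower w) then (1 : Int) else 0)) (i : Int) 0 +
            (if (i : Int) + (k' : Int) < (words.length : Int) then
              PySem.List.pyGetD (words.map (fun w => if PySem.Set.contains query_words (PySem.Str.lower w) then (1 : Int) else 0)) ((i : Int) + (k' : Int)) 0 else 0)
          = pvC words query_words k' (i + 1) := by
        rw [pv_step words query_words k' hk i hi]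
        rw [PySem.List.pyGetD_natCast, pv_flags_getD words query_words i hi]
        by_cases hlt : i + k' < words.length
        · have hlt' : (i : Int) + (k' : Int) < (words.length : Int) := by omega
          rw [if_pos hlt', dif_pos hlt]
          have hcast : ((i : Int) + (k' : Int)) = ((i + k' : Nat) : Int) := by push_cast; ring
          rw [hcast, PySem.List.pyGetD_natCast, pv_flags_getD words query_words (i + k') hlt]
        · have hlt' : ¬ ((i : Int) + (k' : Int) < (words.length : Int)) := by omega
          rw [if_neg hlt', dif_neg hlt]
      rw [hmatch, hcnt']
      by_cases hgt : pvC words query_words k' i > maxm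
      · rw [if_pos hgt, if_pos hgt]
        exact ih (i + 1) (by omega) _ _ _ (by unfold pvRel; exact Or.inr ⟨i, rfl, hi, rfl⟩)
      · rw [if_neg hgt, if_neg hgt]
        exact ih (i + 1) (by omega) _ _ _ hrel

-- with no matching word anywhere, A's loop never updates its best snippet
theorem pv_nomatch (words query_words : List String) (k : Int)
    (hnm : ∀ w ∈ words, pvFlag query_words w = false) :
    ∀ (m i : Nat), words.length - i = m → ∀ (maxm : Int), 0 ≤ maxm → ∀ (bs : String),
      pvAGo words query_words k i bs maxm = bs := by
  intro m
  induction m with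
  | zero =>
      intro i him maxm h0 bs
      rw [pvAGo]
      simp only [dif_neg (show ¬ i < words.length by omega)]
  | succ m ih =>
      intro i him maxm h0 bs
      have hi : i < words.length := by omega
      rw [pvAGo]
      simp only [dif_pos hi]
      by_cases hw : PySem.List.slice words (some (i : Int)) (some ((i : Int) + k)) = []
      · rw [if_pos hw]
      · rw [if_neg hw]
        have hm : (PySem.List.slice words (some (i : Int)) (some ((i : Int) + k))).foldl
            (fun acc word => if PySem.Set.contains query_words (PySem.Str.lower word) then acc + 1 else acc) (0 : Int) = 0 := by
          rw [PySem.List.foldl_if_add_one]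
          have hcp : (PySem.List.slice words (some (i : Int)) (some ((i : Int) + k))).countP
              (fun word => PySem.Set.contains query_words (PySem.Str.lower word)) = 0 :=
            List.countP_eq_zero.mpr (fun w hw' => by
              simpa [pvFlag] using hnm w (PySem.List.mem_of_mem_slice _ _ _ hw'))
          rw [hcp]
          simp
        rw [hm, if_neg (by omega)]
        exact ih (i + 1) (by omega) maxm h0 bs

-- the whole computation, stated on an arbitrary word list (zeta-reduced bodies of both ports)
theorem pv_main (words query_words : List String) (context_words : Int)
    (hpre : (0 : Int) < context_words) (hwords : ∀ w ∈ words, w ≠ "") :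
    (if pvAGo words query_words (context_words * 2) 0 "" 0 ≠ "" then
        pvAGo words query_words (context_words * 2) 0 "" 0 ++ "..." else "")
    = (if words = [] ∨ context_words * 2 ≤ 0 then ""
       else
        if (pvBGo (words.map (fun w => if PySem.Set.contains query_words (PySem.Str.lower w) then (1 : Int) else 0))
              (context_words * 2) 0
              ((PySem.List.slice (words.map (fun w => if PySem.Set.contains query_words (PySem.Str.lower w) then (1 : Int) else 0))
                none (some (context_words * 2))).sum) (-1) 0).1 < 0 then ""
        else PySem.Str.join " "
            (PySem.List.slice words
              (some (pvBGo (words.map (fun w => if PySem.Set.contains query_words (PySem.Str.lower w) then (1 : Int) else 0))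
                (context_words * 2) 0
                ((PySem.List.slice (words.map (fun w => if PySem.Set.contains query_words (PySem.Str.lower w) then (1 : Int) else 0))
                  none (some (context_words * 2))).sum) (-1) 0).1)
              (some ((pvBGo (words.map (fun w => if PySem.Set.contains query_words (PySem.Str.lower w) then (1 : Int) else 0))
                (context_words * 2) 0
                ((PySem.List.slice (words.map (fun w => if PySem.Set.contains query_words (PySem.Str.lower w) then (1 : Int) else 0))
                  none (some (context_words * 2))).sum) (-1) 0).1 + context_words * 2))) ++ "...") := by
  by_cases hw0 : words = []
  · subst hw0
    rw [pvAGo]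
    simp
  · obtain ⟨k', hk'⟩ : ∃ k' : Nat, context_words * 2 = (k' : Int) :=
      ⟨(context_words * 2).toNat, by omega⟩
    have hk1 : 1 ≤ k' := by omega
    have hguard : ¬ (words = [] ∨ context_words * 2 ≤ 0) := by
      intro h; rcases h with h | h
      · exact hw0 h
      · omega
    rw [if_neg hguard]
    have hcnt0 : (PySem.List.slice
          (words.map (fun w => if PySem.Set.contains query_words (PySem.Str.lower w) then (1 : Int) else 0))
          none (some (context_words * 2))).sum = pvC words query_words k' 0 := by
      rw [PySem.List.slice_to _ (by omega), hk']
      rw [show ((k' : Int).toNat) = k' from by omega, ← List.map_take,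
        PySem.List.sum_map_ite_one_zero]
      unfold pvC pvFlag
      simp
    rw [hcnt0, hk']
    have hrel := pv_loop words query_words k' hk1 (words.length - 0) 0 rfl (-1) 0 ""
      (by unfold pvRel; exact Or.inl ⟨rfl, rfl⟩)
    rcases hrel with ⟨hbi, hbs⟩ | ⟨j, hbi, hj, hbs⟩
    · rw [hbs, hbi]
      simp
    · have hwne : (words.drop j).take k' ≠ [] := by
        intro h
        rcases List.take_eq_nil_iff.mp h with h | h
        · omega
        · rw [List.drop_eq_nil_iff] at h; omega
      have hjoin : PySem.Str.join " " ((words.drop j).take k') ≠ "" := by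
        refine pv_join_ne _ hwne ?_
        intro w hw
        exact hwords w (List.mem_of_mem_drop (List.mem_of_mem_take hw))
      have hj0 : ¬ ((j : Int) < 0) := by omega
      rw [hbs, hbi, if_pos hjoin, if_neg hj0]
      congr 1
      rw [PySem.List.slice_natCast_add words j k']

-- ===== VERDICT (by name: the statement is the Claim_ definition above) =====
theorem generate_snippet_py_spec : Claim_equal_generate_snippet_py := by
  intro content query_words context_words _hdom hpre
  by_cases hcw : (0 : Int) < context_words
  · exact pv_main (PySem.Str.split₀ content) query_words context_words hcw (pv_words_ne content)
  · unfold Pre_generate_snippet_py at hpre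
    rcases hpre with h | h
    · exact absurd h hcw
    · have hnm : ∀ w ∈ PySem.Str.split₀ content, pvFlag query_words w = false := by
        intro w hw
        simpa using List.all_eq_true.mp h w hw
      have hA : pvAGo (PySem.Str.split₀ content) query_words (context_words * 2) 0 "" 0 = "" :=
        pv_nomatch (PySem.Str.split₀ content) query_words (context_words * 2) hnm
          ((PySem.Str.split₀ content).length - 0) 0 rfl 0 le_rfl ""
      have hAe : generate_snippet_py content query_words context_words = "" := by
        simp [generate_snippet_py, hA]
      have hBe : generate_snippet_py_alt content query_words context_words = "" := by
        simp [generate_snippet_py_alt, show context_words * 2 ≤ 0 by omega]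
      unfold Spec_generate_snippet_py
      rw [hAe, hBe]
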